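-- pv_equiv track=rewrite | github.com/temaepilot-sys/dcs-sightseeing-helper | miz_route_builder.py | _compute_brace_pairs
-- ===== SOURCE A (Python) =====
-- from typing import Dict, List, Optional, Tuple
--
-- def _compute_brace_pairs(text: str) -> dict:
--     stack: List[int] = []
--     pairs: dict = {}
--     in_str = False
--     escape = False
--     for i, ch in enumerate(text):
--         if in_str:
--             if escape:
--                 escape = False
--             elif ch == "\\":
--                 escape = True
--             elif ch == "\"":
--                 in_str = False
--             continue
--         if ch == "\"":
--             in_str = True
--             continue
--         if ch == "{":
--             stack.append(i)
--         elif ch == "}":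
--             if not stack:
--                 raise ValueError("Unbalanced braces while building brace pairs")
--             start = stack.pop()
--             pairs[start] = i
--     if stack:
--         raise ValueError("Unbalanced braces while building brace pairs")
--     return pairs
-- ===== SOURCE B (Python) =====
-- def _compute_brace_pairs(text: str) -> dict:
--     # Pass 1: tokenize — collect the brace characters that lie outside string
--     # literals (honoring backslash escapes and double quotes).
--     tokens = []
--     in_str = False
--     escape = False
--     for i, ch in enumerate(text):
--         if in_str:
--             if escape:
--                 escape = False
--             elif ch == "\\":
--                 escape = True
--             elif ch == "\"":
--                 in_str = False
--         elif ch == "\"":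
--             in_str = True
--         elif ch in "{}":
--             tokens.append((i, ch))
--     # Pass 2: match the brace tokens with a stack.
--     stack = []
--     pairs = {}
--     for i, ch in tokens:
--         if ch == "{":
--             stack.append(i)
--         else:
--             if not stack:
--                 raise ValueError("Unbalanced braces while building brace pairs")
--             pairs[stack.pop()] = i
--     if stack:
--         raise ValueError("Unbalanced braces while building brace pairs")
--     return pairs
-- ===== Notes on version B (the rewrite author's own statement) =====
-- stated objective: alternative
-- what changed: Splits A's fused loop into two passes: a tokenizer that first extracts the brace characters outside string literals, then a separate stack-based matcher over that token list.
import Mathlib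
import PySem

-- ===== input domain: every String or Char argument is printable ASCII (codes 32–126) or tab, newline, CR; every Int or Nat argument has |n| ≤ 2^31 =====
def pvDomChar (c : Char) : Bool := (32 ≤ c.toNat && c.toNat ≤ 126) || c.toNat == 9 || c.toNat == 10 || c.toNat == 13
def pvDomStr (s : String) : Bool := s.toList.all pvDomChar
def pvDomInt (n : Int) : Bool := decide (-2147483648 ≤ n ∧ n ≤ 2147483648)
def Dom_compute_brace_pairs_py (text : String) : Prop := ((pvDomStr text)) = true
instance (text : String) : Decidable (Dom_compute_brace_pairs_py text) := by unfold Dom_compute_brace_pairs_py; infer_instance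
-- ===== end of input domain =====

-- B replaces A's single fused scan by a tokenizer pass (braces outside string
-- literals) followed by a separate stack matcher over the token list (objective:
-- alternative decomposition, same cost). Equivalence is about the return value;
-- inputs on which both Pythons raise ValueError are excluded by Pre_.

-- ===== PORT A =====
-- fused loop of A; the raise paths (underflow / leftover stack) are outside Pre_
def pvGoA : List (Int × Char) → List Int → PySem.Dict Int Int → Bool → Bool → PySem.Dict Int Int
  | [], _, pairs, _, _ => pairs  -- Python raises here if the stack is nonempty (outside Pre_)
  | (i, ch) :: rest, stack, pairs, in_str, escape =>
    if in_str then
      if escape then pvGoA rest stack pairs true false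
      else if ch = '\\' then pvGoA rest stack pairs true true
      else if ch = '"' then pvGoA rest stack pairs false escape
      else pvGoA rest stack pairs true escape
    else if ch = '"' then pvGoA rest stack pairs true escape
    else if ch = '{' then pvGoA rest (i :: stack) pairs false escape
    else if ch = '}' then
      match stack with
      | [] => pairs  -- Python raises here (outside Pre_)
      | s :: ss => pvGoA rest ss (pairs.insert s i) false escape
    else pvGoA rest stack pairs false escape

def compute_brace_pairs_py (text : String) : List (Int × Int) :=
  (pvGoA (PySem.List.enumerate text.toList) [] PySem.Dict.empty false false).items

-- ===== PORT B =====
-- pass 1 of B: the brace characters lying outside string literals, with indices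
def pvScanToks : List (Int × Char) → Bool → Bool → List (Int × Char)
  | [], _, _ => []
  | (i, ch) :: rest, in_str, escape =>
    if in_str then
      if escape then pvScanToks rest true false
      else if ch = '\\' then pvScanToks rest true true
      else if ch = '"' then pvScanToks rest false escape
      else pvScanToks rest true escape
    else if ch = '"' then pvScanToks rest true escape
    else if ch = '{' ∨ ch = '}' then (i, ch) :: pvScanToks rest false escape
    else pvScanToks rest false escape

-- pass 2 of B: match the brace tokens with a stack
def pvMatchToks : List (Int × Char) → List Int → PySem.Dict Int Int → PySem.Dict Int Int
  | [], _, pairs => pairs  -- Python raises here if the stack is nonempty (outside Pre_)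
  | (i, ch) :: rest, stack, pairs =>
    if ch = '{' then pvMatchToks rest (i :: stack) pairs
    else
      match stack with
      | [] => pairs  -- Python raises here (outside Pre_)
      | s :: ss => pvMatchToks rest ss (pairs.insert s i)

def compute_brace_pairs_py_alt (text : String) : List (Int × Int) :=
  (pvMatchToks (pvScanToks (PySem.List.enumerate text.toList) false false) [] PySem.Dict.empty).items

-- ===== PRECONDITION & SPEC =====
-- Pre_ excludes exactly the inputs on which Python A raises ValueError: the
-- braces outside string literals must be balanced (no prefix closes more than
-- it has opened, and the final nesting depth is zero).
def Pre_compute_brace_pairs_py (text : String) : Prop :=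
  let st : Bool × Bool × Int × Int :=
    text.toList.foldl (fun st ch =>
      let (in_str, escape, d, m) := st
      if in_str then
        if escape then (true, false, d, m)
        else if ch = '\\' then (true, true, d, m)
        else if ch = '"' then (false, false, d, m)
        else (true, false, d, m)
      else if ch = '"' then (true, false, d, m)
      else if ch = '{' then (false, false, d + 1, m)
      else if ch = '}' then (false, false, d - 1, min m (d - 1))
      else (false, false, d, m)) (false, false, 0, 0)
  st.2.2.1 = 0 ∧ 0 ≤ st.2.2.2
instance (text : String) : Decidable (Pre_compute_brace_pairs_py text) := by unfold Pre_compute_brace_pairs_py; infer_instance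

def pvWitness_compute_brace_pairs_py : String := "{\"}\"}{}"

def Spec_compute_brace_pairs_py (text : String) (out : List (Int × Int)) : Prop := out = compute_brace_pairs_py_alt text
instance (text : String) (out : List (Int × Int)) : Decidable (Spec_compute_brace_pairs_py text out) := by unfold Spec_compute_brace_pairs_py; infer_instance

-- ===== CLAIM (what is proved, stated in full; the proofs are below) =====
def Claim_equal_compute_brace_pairs_py : Prop := ∀ (text : String), Dom_compute_brace_pairs_py text → Pre_compute_brace_pairs_py text → Spec_compute_brace_pairs_py text (compute_brace_pairs_py text)

-- ===== LEMMAS AND PROOFS =====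

-- A's fused loop equals B's matcher applied to B's token stream, for any state.
theorem pvGoA_eq (l : List (Int × Char)) (stack : List Int) (pairs : PySem.Dict Int Int) (in_str escape : Bool) :
    pvGoA l stack pairs in_str escape = pvMatchToks (pvScanToks l in_str escape) stack pairs := by
  induction l generalizing stack pairs in_str escape with
  | nil => rfl
  | cons p rest ih =>
    obtain ⟨i, ch⟩ := p
    have ihg : ∀ (s : List Int) (p : PySem.Dict Int Int) (b e : Bool),
        pvGoA rest s p b e = pvMatchToks (pvScanToks rest b e) s p := by
      intro s p b e
      exact ih s p b e
    simp only [pvGoA, pvScanToks]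
    split_ifs <;>
      first
        | exact ihg _ _ _ _
        | tauto
        | (cases stack <;> simp only [pvMatchToks] <;> (try split_ifs) <;>
            first
              | rfl
              | exact ihg _ _ _ _)

-- ===== VERDICT (by name: the statement is the Claim_ definition above) =====
theorem compute_brace_pairs_py_spec : Claim_equal_compute_brace_pairs_py := by
  intro text _ _
  unfold Spec_compute_brace_pairs_py compute_brace_pairs_py compute_brace_pairs_py_alt
  rw [pvGoA_eq]
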